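-- pv_equiv track=rewrite | github.com/Ryzen-Starbit/LENS | backend/pipeline.py | overall_verdict
-- ===== SOURCE A (Python) =====
-- def overall_verdict(results):
--     true_count = sum(1 for r in results if r["status"] == "True")
--     false_count = sum(1 for r in results if r["status"] == "False")
--     if false_count > 0:
--         return "Likely Misinformation"
--     elif true_count == len(results) and len(results) > 0:
--         return "Highly Accurate"
--     elif true_count > 0:
--         return "Partially True / Misleading"
--     else:
--         return "Unverified"
-- ===== SOURCE B (Python) =====
-- RANK = {"True": 0, "False": 2}
--
-- def overall_verdict(results):
--     ranks = [RANK.get(r["status"], 1) for r in results]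
--     if not ranks:
--         return "Unverified"
--     hi = max(ranks)
--     lo = min(ranks)
--     if hi == 2:
--         return "Likely Misinformation"
--     if hi == 0:
--         return "Highly Accurate"
--     if lo == 0:
--         return "Partially True / Misleading"
--     return "Unverified"
-- ===== Notes on version B (the rewrite author's own statement) =====
-- stated objective: alternative
-- what changed: Maps every status to a numeric severity rank (True=0, other=1, False=2) and classifies by the extremes max/min of the rank list instead of counting matches against the length: hi=2 means some False, hi=0 means all True, lo=0 means some True.
import Mathlib
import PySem

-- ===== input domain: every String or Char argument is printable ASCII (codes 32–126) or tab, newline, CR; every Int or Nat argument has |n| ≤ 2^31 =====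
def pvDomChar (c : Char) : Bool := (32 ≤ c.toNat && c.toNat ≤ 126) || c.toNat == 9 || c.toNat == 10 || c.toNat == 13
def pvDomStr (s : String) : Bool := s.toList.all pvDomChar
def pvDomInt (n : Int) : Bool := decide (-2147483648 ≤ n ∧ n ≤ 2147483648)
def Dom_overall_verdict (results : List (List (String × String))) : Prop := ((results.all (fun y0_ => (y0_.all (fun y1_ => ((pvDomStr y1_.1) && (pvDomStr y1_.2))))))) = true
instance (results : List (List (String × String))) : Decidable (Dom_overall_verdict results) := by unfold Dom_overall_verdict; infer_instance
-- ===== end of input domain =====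

-- B ranks each status numerically (True=0, other=1, False=2) and classifies by max/min of the ranks instead of counting; return-value equivalence only.

-- shared helper: r["status"] (first match in the association list); total form, exact under Pre_
def statusOf (r : List (String × String)) : String := (List.lookup "status" r).getD ""

-- ===== PORT A =====
def overall_verdict (results : List (List (String × String))) : String :=
  let true_count : Int := (results.countP (fun r => statusOf r == "True") : Int)
  let false_count : Int := (results.countP (fun r => statusOf r == "False") : Int)
  if 0 < false_count then "Likely Misinformation"
  else if true_count = (results.length : Int) ∧ 0 < (results.length : Int) then "Highly Accurate"
  else if 0 < true_count then "Partially True / Misleading"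
  else "Unverified"

-- ===== PORT B =====
-- RANK.get(status, 1) as a conditional (the dict is a two-entry constant)
def rankOf (s : String) : Int := if s == "True" then 0 else if s == "False" then 2 else 1

def overall_verdict_alt (results : List (List (String × String))) : String :=
  let ranks : List Int := results.map (fun r => rankOf (statusOf r))
  if ranks = [] then "Unverified"
  else
    let hi : Int := (PySem.List.max? ranks (fun x => x)).getD 0
    let lo : Int := (PySem.List.min? ranks (fun x => x)).getD 0
    if hi = 2 then "Likely Misinformation"
    else if hi = 0 then "Highly Accurate"
    else if lo = 0 then "Partially True / Misleading"
    else "Unverified"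

-- ===== PRECONDITION & SPEC =====
-- Pre_ excludes exactly the inputs where some result dict has no "status" key: there the
-- Python A raises KeyError (and B raises the same KeyError).
def Pre_overall_verdict (results : List (List (String × String))) : Prop :=
  (results.all (fun r => (List.lookup "status" r).isSome)) = true
instance (results : List (List (String × String))) : Decidable (Pre_overall_verdict results) := by unfold Pre_overall_verdict; infer_instance
def pvWitness_overall_verdict : (List (List (String × String))) := [[("status", "True")], [("status", "Unknown")]]

def Spec_overall_verdict (results : List (List (String × String))) (out : String) : Prop := out = overall_verdict_alt results
instance (results : List (List (String × String))) (out : String) : Decidable (Spec_overall_verdict results out) := by unfold Spec_overall_verdict; infer_instance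

-- ===== CLAIM (what is proved, stated in full; the proofs are below) =====
def Claim_equal_overall_verdict : Prop := ∀ (results : List (List (String × String))), Dom_overall_verdict results → Pre_overall_verdict results → Spec_overall_verdict results (overall_verdict results)

-- ===== LEMMAS AND PROOFS =====

theorem rankOf_eq_zero (s : String) : rankOf s = 0 ↔ s = "True" := by
  unfold rankOf; split_ifs with h1 h2 <;> simp_all

theorem rankOf_eq_two (s : String) : rankOf s = 2 ↔ s = "False" := by
  unfold rankOf; split_ifs with h1 h2 <;> simp_all

theorem rankOf_bounds (s : String) : 0 ≤ rankOf s ∧ rankOf s ≤ 2 := by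
  unfold rankOf; split_ifs <;> omega

-- hi = 2 on a nonempty rank list ↔ some result has status "False"
theorem hi_eq_two (results : List (List (String × String)))
    (m : Int) (hm : PySem.List.max? (results.map (fun r => rankOf (statusOf r))) (fun x => x) = some m) :
    m = 2 ↔ ∃ r ∈ results, statusOf r = "False" := by
  constructor
  · intro h2
    have hmem := PySem.List.max?_mem hm
    obtain ⟨r, hr, he⟩ := List.mem_map.1 hmem
    exact ⟨r, hr, (rankOf_eq_two _).1 (by rw [he, h2])⟩
  · rintro ⟨r, hr, hs⟩
    have hle : (2 : Int) ≤ m := by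
      have := PySem.List.max?_isMax hm (rankOf (statusOf r)) (List.mem_map_of_mem hr)
      simpa [hs, rankOf] using this
    have hub : m ≤ 2 := by
      have hmem := PySem.List.max?_mem hm
      obtain ⟨r', _, he⟩ := List.mem_map.1 hmem
      rw [← he]; exact (rankOf_bounds _).2
    omega

-- hi = 0 on a nonempty rank list ↔ every result has status "True"
theorem hi_eq_zero (results : List (List (String × String)))
    (m : Int) (hm : PySem.List.max? (results.map (fun r => rankOf (statusOf r))) (fun x => x) = some m) :
    m = 0 ↔ ∀ r ∈ results, statusOf r = "True" := by
  constructor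
  · intro h0 r hr
    have := PySem.List.max?_isMax hm (rankOf (statusOf r)) (List.mem_map_of_mem hr)
    have hlb := (rankOf_bounds (statusOf r)).1
    exact (rankOf_eq_zero _).1 (by omega)
  · intro hall
    have hmem := PySem.List.max?_mem hm
    obtain ⟨r, hr, he⟩ := List.mem_map.1 hmem
    rw [← he]
    exact (rankOf_eq_zero _).2 (hall r hr)

-- lo = 0 on a nonempty rank list ↔ some result has status "True"
theorem lo_eq_zero (results : List (List (String × String)))
    (m : Int) (hm : PySem.List.min? (results.map (fun r => rankOf (statusOf r))) (fun x => x) = some m) :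
    m = 0 ↔ ∃ r ∈ results, statusOf r = "True" := by
  constructor
  · intro h0
    have hmem := PySem.List.min?_mem hm
    obtain ⟨r, hr, he⟩ := List.mem_map.1 hmem
    exact ⟨r, hr, (rankOf_eq_zero _).1 (by rw [he, h0])⟩
  · rintro ⟨r, hr, hs⟩
    have hle : m ≤ 0 := by
      have := PySem.List.min?_isMin hm (rankOf (statusOf r)) (List.mem_map_of_mem hr)
      simpa [hs, rankOf] using this
    have hlb : 0 ≤ m := by
      have hmem := PySem.List.min?_mem hm
      obtain ⟨r', _, he⟩ := List.mem_map.1 hmem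
      rw [← he]; exact (rankOf_bounds _).1
    omega

-- ===== VERDICT (by name: the statement is the Claim_ definition above) =====
theorem overall_verdict_spec : Claim_equal_overall_verdict := by
  intro results _ _
  unfold Spec_overall_verdict overall_verdict overall_verdict_alt
  rcases hres : results with _ | ⟨r0, rest⟩
  · decide
  · rw [← hres]
    have hne : results.map (fun r => rankOf (statusOf r)) ≠ [] := by
      rw [hres]; simp
    rw [if_neg hne]
    rcases hm : PySem.List.max? (results.map (fun r => rankOf (statusOf r))) (fun x => x) with _ | m
    · exact absurd ((PySem.List.max?_eq_none_iff _ _).1 hm) hne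
    rcases hn : PySem.List.min? (results.map (fun r => rankOf (statusOf r))) (fun x => x) with _ | n
    · exact absurd ((PySem.List.min?_eq_none_iff _ _).1 hn) hne
    simp only at *
    simp only [Option.getD_some]
    have hlen : 0 < (results.length : Int) := by rw [hres]; simp
    by_cases hF : ∃ r ∈ results, statusOf r = "False"
    · have hcA : 0 < (results.countP (fun r => statusOf r == "False") : Int) := by
        have : 0 < results.countP (fun r => statusOf r == "False") := by
          rw [List.countP_pos_iff]
          obtain ⟨r, hr, he⟩ := hF
          exact ⟨r, hr, by simp [he]⟩
        exact_mod_cast this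
      rw [if_pos hcA, if_pos ((hi_eq_two results m hm).2 hF)]
    · have hcF : ¬ 0 < (results.countP (fun r => statusOf r == "False") : Int) := by
        intro h
        have : 0 < results.countP (fun r => statusOf r == "False") := by exact_mod_cast h
        obtain ⟨r, hr, he⟩ := List.countP_pos_iff.1 this
        exact hF ⟨r, hr, by simpa using he⟩
      rw [if_neg hcF, if_neg (fun h => hF ((hi_eq_two results m hm).1 h))]
      by_cases hAll : ∀ r ∈ results, statusOf r = "True"
      · have hcT : (results.countP (fun r => statusOf r == "True") : Int) = (results.length : Int) ∧
            0 < (results.length : Int) := by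
          refine ⟨?_, hlen⟩
          have : results.countP (fun r => statusOf r == "True") = results.length := by
            rw [List.countP_eq_length]; intro r hr; simp [hAll r hr]
          exact_mod_cast this
        rw [if_pos hcT, if_pos ((hi_eq_zero results m hm).2 hAll)]
      · have hcT : ¬ ((results.countP (fun r => statusOf r == "True") : Int) = (results.length : Int) ∧
            0 < (results.length : Int)) := by
          rintro ⟨h1, _⟩
          apply hAll
          intro r hr
          have h1' : results.countP (fun r => statusOf r == "True") = results.length := by
            exact_mod_cast h1
          simpa using List.countP_eq_length.1 h1' r hr
        rw [if_neg hcT, if_neg (fun h => hAll ((hi_eq_zero results m hm).1 h))]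
        by_cases hT : ∃ r ∈ results, statusOf r = "True"
        · have hcT1 : 0 < (results.countP (fun r => statusOf r == "True") : Int) := by
            have : 0 < results.countP (fun r => statusOf r == "True") := by
              rw [List.countP_pos_iff]
              obtain ⟨r, hr, he⟩ := hT
              exact ⟨r, hr, by simp [he]⟩
            exact_mod_cast this
          rw [if_pos hcT1, if_pos ((lo_eq_zero results n hn).2 hT)]
        · have hcT1 : ¬ 0 < (results.countP (fun r => statusOf r == "True") : Int) := by
            intro h
            have : 0 < results.countP (fun r => statusOf r == "True") := by exact_mod_cast h
            obtain ⟨r, hr, he⟩ := List.countP_pos_iff.1 this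
            exact hT ⟨r, hr, by simpa using he⟩
          rw [if_neg hcT1, if_neg (fun h => hT ((lo_eq_zero results n hn).1 h))]
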